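-- pv_equiv track=rewrite | github.com/Mattchaup/extreme_pendu | pendu_extrême.py | mot_a_choisir
-- ===== SOURCE A (Python) =====
-- def mot_a_choisir(liste,lettre):
--     val = []
--     liste2 = []
--     for mot in liste:
--         val.append(mot.count(lettre))
--
--     minim = min(val)
--
--     for mot in liste:
--         if mot.count(lettre) == minim:
--             liste2.append(mot)
--     return liste2
-- ===== SOURCE B (Python) =====
-- def mot_a_choisir(liste, lettre):
--     minim = None
--     liste2 = []
--     for mot in liste:
--         c = mot.count(lettre)
--         if minim is None or c < minim:
--             minim = c
--             liste2 = [mot]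
--         elif c == minim:
--             liste2.append(mot)
--     return liste2
-- ===== Notes on version B (the rewrite author's own statement) =====
-- stated objective: alternative
-- what changed: Replaces A's two passes (build a list of all counts, take min, then re-count every word to filter) with a single running-minimum pass that resets/extends the result list in place; Pre_ excludes only the empty list, on which A raises ValueError (min of empty sequence).
import Mathlib
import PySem

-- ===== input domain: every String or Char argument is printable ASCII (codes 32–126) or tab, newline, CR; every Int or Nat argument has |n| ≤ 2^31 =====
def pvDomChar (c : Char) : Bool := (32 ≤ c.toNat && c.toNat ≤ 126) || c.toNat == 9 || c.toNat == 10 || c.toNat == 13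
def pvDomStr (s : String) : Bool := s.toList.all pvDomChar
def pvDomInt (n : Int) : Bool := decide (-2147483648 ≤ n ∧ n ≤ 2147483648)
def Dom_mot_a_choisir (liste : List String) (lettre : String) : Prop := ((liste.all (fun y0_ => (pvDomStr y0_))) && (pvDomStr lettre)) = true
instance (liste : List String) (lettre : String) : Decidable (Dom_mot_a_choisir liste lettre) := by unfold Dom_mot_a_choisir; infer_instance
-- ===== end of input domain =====

-- B replaces A's two counting passes (count list + min + re-count filter) by one
-- running-minimum pass that counts each word once (same asymptotic cost).

-- ===== PORT A =====
def mot_a_choisir (liste : List String) (lettre : String) : List String :=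
  -- val = [mot.count(lettre) for mot in liste] built by append; min(val) = PySem.List.min?
  match PySem.List.min? (liste.foldl (fun acc mot => acc ++ [PySem.Str.count mot lettre]) []) (fun x => x) with
  | none => []  -- Python raises ValueError here (min of empty list); excluded by Pre_
  | some minim =>
    liste.foldl (fun l2 mot => if PySem.Str.count mot lettre == minim then l2 ++ [mot] else l2) []

-- ===== PORT B =====
-- the loop body of Source B as a named helper
def altStep (lettre : String) (st : Option Nat × List String) (mot : String) : Option Nat × List String :=
  let c := PySem.Str.count mot lettre
  match st.1 with
  | none => (some c, [mot])
  | some m =>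
    if c < m then (some c, [mot])
    else if c == m then (some m, st.2 ++ [mot])
    else st

def mot_a_choisir_alt (liste : List String) (lettre : String) : List String :=
  (liste.foldl (altStep lettre) (none, [])).2

-- ===== PRECONDITION & SPEC =====
-- Pre_ excludes only the empty list, on which Python A raises ValueError (min of empty sequence).
def Pre_mot_a_choisir (liste : List String) (lettre : String) : Prop := liste ≠ []
instance (liste : List String) (lettre : String) : Decidable (Pre_mot_a_choisir liste lettre) := by unfold Pre_mot_a_choisir; infer_instance
def pvWitness_mot_a_choisir : List String × String := (["ab", "b"], "a")

def Spec_mot_a_choisir (liste : List String) (lettre : String) (out : List String) : Prop := out = mot_a_choisir_alt liste lettre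
instance (liste : List String) (lettre : String) (out : List String) : Decidable (Spec_mot_a_choisir liste lettre out) := by unfold Spec_mot_a_choisir; infer_instance

-- ===== CLAIM (what is proved, stated in full; the proofs are below) =====
def Claim_equal_mot_a_choisir : Prop := ∀ (liste : List String) (lettre : String), Dom_mot_a_choisir liste lettre → Pre_mot_a_choisir liste lettre → Spec_mot_a_choisir liste lettre (mot_a_choisir liste lettre)

-- ===== LEMMAS AND PROOFS =====

theorem foldl_min_le (l : List Nat) (a : Nat) : l.foldl min a ≤ a := by
  induction l generalizing a with
  | nil => simp
  | cons x t ih => exact le_trans (ih (min a x)) (min_le_left a x)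

-- B's running-minimum loop, characterised from an already-set state (some m, acc).
theorem alt_fold_char (lettre : String) (l : List String) (m : Nat) (acc : List String) :
    l.foldl (altStep lettre) (some m, acc)
    = ((some ((l.map (fun w => PySem.Str.count w lettre)).foldl min m)),
       (if (l.map (fun w => PySem.Str.count w lettre)).foldl min m = m then acc else []) ++
         l.filter (fun w => PySem.Str.count w lettre == (l.map (fun w => PySem.Str.count w lettre)).foldl min m)) := by
  induction l generalizing m acc with
  | nil => simp
  | cons w t ih =>
    simp only [List.foldl_cons, List.map_cons, List.filter_cons, altStep]
    by_cases h1 : PySem.Str.count w lettre < m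
    · rw [if_pos h1, ih]
      have hmin : min m (PySem.Str.count w lettre) = PySem.Str.count w lettre := by omega
      simp only [hmin]
      have hle := foldl_min_le (t.map (fun w => PySem.Str.count w lettre)) (PySem.Str.count w lettre)
      rw [if_neg (by omega :
        ¬ (t.map (fun w => PySem.Str.count w lettre)).foldl min (PySem.Str.count w lettre) = m)]
      by_cases h2 : (t.map (fun w => PySem.Str.count w lettre)).foldl min (PySem.Str.count w lettre)
          = PySem.Str.count w lettre
      · rw [if_pos h2, if_pos (by simp only [beq_iff_eq]; omega)]
        simp
      · rw [if_neg h2, if_neg (by simp only [beq_iff_eq]; omega)]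
    · rw [if_neg h1]
      have hmin : min m (PySem.Str.count w lettre) = m := by omega
      simp only [hmin]
      have hle := foldl_min_le (t.map (fun w => PySem.Str.count w lettre)) m
      by_cases h2 : PySem.Str.count w lettre = m
      · rw [if_pos (show (PySem.Str.count w lettre == m) = true by simp only [beq_iff_eq]; omega), ih]
        by_cases h3 : (t.map (fun w => PySem.Str.count w lettre)).foldl min m = m
        · rw [if_pos h3, if_pos h3, if_pos (by simp only [beq_iff_eq]; omega)]
          simp
        · rw [if_neg h3, if_neg h3, if_neg (by simp only [beq_iff_eq]; omega)]
      · rw [if_neg (show ¬(PySem.Str.count w lettre == m) = true by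
              simp only [beq_iff_eq]; omega), ih,
            if_neg (show ¬(PySem.Str.count w lettre ==
                (t.map (fun w => PySem.Str.count w lettre)).foldl min m) = true by
              simp only [beq_iff_eq]; omega)]

-- ===== VERDICT (by name: the statement is the Claim_ definition above) =====
theorem mot_a_choisir_spec : Claim_equal_mot_a_choisir := by
  intro liste lettre _ hpre
  unfold Spec_mot_a_choisir mot_a_choisir mot_a_choisir_alt
  cases liste with
  | nil => exact absurd rfl hpre
  | cons w t =>
    rw [PySem.List.foldl_append_singleton_eq_map, List.nil_append, List.map_cons,
        PySem.List.min?_id_cons, List.foldl_cons,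
        show altStep lettre (none, []) w = (some (PySem.Str.count w lettre), [w]) from rfl,
        alt_fold_char]
    simp only [PySem.List.foldl_append_if_eq_filter, List.nil_append, List.filter_cons]
    have hle := foldl_min_le (t.map (fun w' => PySem.Str.count w' lettre)) (PySem.Str.count w lettre)
    by_cases h2 : (t.map (fun w' => PySem.Str.count w' lettre)).foldl min (PySem.Str.count w lettre)
        = PySem.Str.count w lettre
    · rw [if_pos (by simp only [beq_iff_eq]; omega), if_pos h2]
      simp
    · rw [if_neg (by simp only [beq_iff_eq]; omega), if_neg h2]
      simp
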